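-- pv_equiv track=rewrite | github.com/hanjunlei11/algorithm | 匹配语义模板表达式.py | get_or_index
-- ===== SOURCE A (Python) =====
-- def get_or_index(pattern_str):
--     ors = []
--     depth = 0  # 当前级别
--     for i in range(len(pattern_str)):
--         c = pattern_str[i]
--         if c == '<':  # 因为成对出现，最后肯定depth又变成的；
--             depth += 1
--         elif c == '>':
--             depth -= 1
--         elif c == '|' and depth == 0:
--             ors.append(i)  # 与根同层的|符号，直接拆分为子pattern处理
--     return ors
-- ===== SOURCE B (Python) =====
-- def get_or_index(pattern_str):
--     # No running depth: the bracket depth just before position i equals the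
--     # number of '<' minus the number of '>' in the prefix pattern_str[:i],
--     # so a '|' at i is top-level iff those two counts are equal.
--     return [i for i, c in enumerate(pattern_str)
--             if c == '|' and pattern_str[:i].count('<') == pattern_str[:i].count('>')]
-- ===== Notes on version B (the rewrite author's own statement) =====
-- stated objective: alternative
-- what changed: A maintains a mutable running bracket depth in one scan; B keeps no state at all and instead, for each '|' position i, decides top-levelness by comparing the counts of '<' and '>' in the prefix pattern_str[:i] (depth 0 iff the counts are equal), a counting/prefix-comparison algorithm that is quadratic instead of a linear stateful scan.
import Mathlib
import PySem

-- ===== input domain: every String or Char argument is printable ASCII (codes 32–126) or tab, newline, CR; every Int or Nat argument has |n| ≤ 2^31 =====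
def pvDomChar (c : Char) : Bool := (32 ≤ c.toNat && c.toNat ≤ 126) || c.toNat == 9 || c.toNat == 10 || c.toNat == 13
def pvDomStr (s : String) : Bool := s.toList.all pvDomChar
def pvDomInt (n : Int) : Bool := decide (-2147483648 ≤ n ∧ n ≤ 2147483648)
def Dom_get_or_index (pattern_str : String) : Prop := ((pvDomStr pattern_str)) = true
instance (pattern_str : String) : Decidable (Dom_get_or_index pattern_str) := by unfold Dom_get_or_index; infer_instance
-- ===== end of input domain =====

-- B removes A's running depth state entirely: a '|' at i is kept iff the prefix s[:i] contains
-- equally many '<' and '>' (prefix-count comparison, quadratic) — alternative algorithm, not faster.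


-- ===== PORT A =====
def aLoop : List (Int × Char) → Int → List Int
  | [], _ => []
  | (i, c) :: rest, depth =>
    if c = '<' then aLoop rest (depth + 1)
    else if c = '>' then aLoop rest (depth - 1)
    else if c = '|' ∧ depth = 0 then i :: aLoop rest depth
    else aLoop rest depth

def get_or_index (pattern_str : String) : List Int :=
  aLoop (PySem.List.enumerate pattern_str.toList 0) 0

-- ===== PORT B =====
-- Source B's pattern_str[:i].count('<') : a single-character str.count equals the List.count of that
-- character over the sliced code points (exact on this domain).
def get_or_index_alt (pattern_str : String) : List Int :=
  (PySem.List.enumerate pattern_str.toList 0).filterMap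
    (fun p => if p.2 = '|' ∧
        (PySem.List.slice pattern_str.toList none (some p.1)).count '<' =
        (PySem.List.slice pattern_str.toList none (some p.1)).count '>'
      then some p.1 else none)

-- ===== PRECONDITION & SPEC =====
def Spec_get_or_index (pattern_str : String) (out : List Int) : Prop := out = get_or_index_alt pattern_str
instance (pattern_str : String) (out : List Int) : Decidable (Spec_get_or_index pattern_str out) := by unfold Spec_get_or_index; infer_instance

-- ===== CLAIM (what is proved, stated in full; the proofs are below) =====
def Claim_equal_get_or_index : Prop := ∀ (pattern_str : String), Dom_get_or_index pattern_str → Spec_get_or_index pattern_str (get_or_index pattern_str)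

-- ===== LEMMAS AND PROOFS =====

-- common reference recursion carrying position and depth
def refSpec : List Char → Int → Int → List Int
  | [], _, _ => []
  | c :: rest, k, d =>
    (if c = '|' ∧ d = 0 then [k] else []) ++
      refSpec rest (k + 1) (d + (if c = '<' then 1 else 0) - (if c = '>' then 1 else 0))

theorem aLoop_eq_refSpec (cs : List Char) :
    ∀ (k d : Int), aLoop (PySem.List.enumerate cs k) d = refSpec cs k d := by
  induction cs with
  | nil => intro k d; simp [PySem.List.enumerate_nil, aLoop, refSpec]
  | cons c rest ih =>
    intro k d
    rw [PySem.List.enumerate_cons]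
    by_cases h1 : c = '<'
    · simp [aLoop, refSpec, h1, ih]
    · by_cases h2 : c = '>'
      · simp [aLoop, refSpec, h2, ih]
      · by_cases h3 : c = '|' ∧ d = 0
        · simp [aLoop, refSpec, h3, ih]
        · simp [aLoop, refSpec, h1, h2, h3, ih]

-- B's prefix-count filter over the suffix cs of full (= pre ++ cs) equals refSpec started at
-- position pre.length with depth (count '<' pre) - (count '>' pre).
theorem bFilter_eq_refSpec (full : List Char) :
    ∀ (cs pre : List Char), full = pre ++ cs →
      (PySem.List.enumerate cs (pre.length : Int)).filterMap
        (fun p => if p.2 = '|' ∧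
            (PySem.List.slice full none (some p.1)).count '<' =
            (PySem.List.slice full none (some p.1)).count '>'
          then some p.1 else none)
      = refSpec cs (pre.length : Int) ((pre.count '<' : Int) - (pre.count '>' : Int)) := by
  intro cs
  induction cs with
  | nil => intro pre _; simp [PySem.List.enumerate_nil, refSpec]
  | cons c rest ih =>
    intro pre hfull
    rw [PySem.List.enumerate_cons, List.filterMap_cons]
    have htake : List.take pre.length full = pre := by
      rw [hfull]; exact List.take_left
    have htail := ih (pre ++ [c]) (by simp [hfull])
    have hlen : ((pre ++ [c]).length : Int) = (pre.length : Int) + 1 := by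
      simp
    rw [hlen] at htail
    have hcnt : ∀ x : Char, ((pre ++ [c]).count x : Int)
        = (pre.count x : Int) + (if c = x then 1 else 0) := by
      intro x
      by_cases h : c = x <;> simp [List.count_append, h]
    have hd : ((pre ++ [c]).count '<' : Int) - ((pre ++ [c]).count '>' : Int)
        = ((pre.count '<' : Int) - (pre.count '>' : Int))
          + (if c = '<' then 1 else 0) - (if c = '>' then 1 else 0) := by
      rw [hcnt, hcnt]; ring
    rw [hd] at htail
    simp only [refSpec]
    rw [htail]
    by_cases h3 : c = '|' ∧ ((pre.count '<' : Int) - (pre.count '>' : Int)) = 0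
    · have hceq : (pre.count '<') = (pre.count '>') := by omega
      simp [htake, h3.1, hceq]
    · have hnc : ¬ (c = '|' ∧ pre.count '<' = pre.count '>') := by
        intro ⟨hc, heq⟩; exact h3 ⟨hc, by omega⟩
      simp [htake, hnc, h3]

-- ===== VERDICT (by name: the statement is the Claim_ definition above) =====
theorem get_or_index_spec : Claim_equal_get_or_index := by
  intro s _
  unfold Spec_get_or_index get_or_index get_or_index_alt
  rw [aLoop_eq_refSpec]
  have := bFilter_eq_refSpec s.toList s.toList [] (by simp)
  simpa using this.symm
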